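-- pv_equiv track=rewrite | github.com/BotRunner64/pico-bridge | pc_receiver/src/pico_bridge/discovery.py | _choose_advertise_ip
-- ===== SOURCE A (Python) =====
-- import ipaddress
--
-- RFC1918_NETWORKS = (
--     ipaddress.ip_network("10.0.0.0/8"),
--     ipaddress.ip_network("172.16.0.0/12"),
--     ipaddress.ip_network("192.168.0.0/16"),
-- )
--
-- NON_LAN_NETWORKS = (
--     ipaddress.ip_network("198.18.0.0/15"),
-- )
--
-- def _is_advertisable_ipv4(address: ipaddress.IPv4Address) -> bool:
--     return not (
--         address.is_unspecified
--         or address.is_loopback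
--         or address.is_link_local
--         or address.is_multicast
--         or address.is_reserved
--         or any(address in network for network in NON_LAN_NETWORKS)
--     )
--
-- def _choose_advertise_ip(candidates: list[str]) -> str:
--     lan_ips: list[str] = []
--     other_ips: list[str] = []
--
--     for candidate in candidates:
--         try:
--             address = ipaddress.ip_address(candidate)
--         except ValueError:
--             continue
--
--         if address.version != 4 or not _is_advertisable_ipv4(address):
--             continue
--
--         if any(address in network for network in RFC1918_NETWORKS):
--             lan_ips.append(candidate)
--         else:
--             other_ips.append(candidate)
--
--     if lan_ips:
--         return sorted(set(lan_ips))[0]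
--     if other_ips:
--         return sorted(set(other_ips))[0]
--     return "127.0.0.1"
-- ===== SOURCE B (Python) =====
-- def _ipv4_int(s):
--     # CPython's IPv4 dotted-quad grammar: 4 parts, ASCII digits only, <= 3 digits,
--     # no leading zero, value <= 255.  Returns the 32-bit value, or None
--     # (covers both invalid strings and IPv6 addresses, which are skipped anyway).
--     parts = s.split('.')
--     if len(parts) != 4:
--         return None
--     n = 0
--     for p in parts:
--         if not p or len(p) > 3 or any(ch not in "0123456789" for ch in p):
--             return None
--         if len(p) > 1 and p[0] == '0':
--             return None
--         v = int(p)
--         if v > 255: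
--             return None
--         n = n * 256 + v
--     return n
--
--
-- def _choose_advertise_ip(candidates):
--     # One pass keeping running lexicographic minima instead of building lists and sorting.
--     best_lan = None
--     best_other = None
--     for candidate in candidates:
--         n = _ipv4_int(candidate)
--         if n is None:
--             continue
--         # not advertisable: unspecified, loopback, link-local, multicast+reserved, 198.18.0.0/15
--         if (n == 0
--                 or 0x7F000000 <= n < 0x80000000
--                 or 0xA9FE0000 <= n < 0xA9FF0000
--                 or n >= 0xE0000000
--                 or 0xC6120000 <= n < 0xC6140000):
--             continue
--         is_lan = (0x0A000000 <= n < 0x0B000000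
--                   or 0xAC100000 <= n < 0xAC200000
--                   or 0xC0A80000 <= n < 0xC0A90000)
--         if is_lan:
--             if best_lan is None or candidate < best_lan:
--                 best_lan = candidate
--         else:
--             if best_other is None or candidate < best_other:
--                 best_other = candidate
--     if best_lan is not None:
--         return best_lan
--     if best_other is not None:
--         return best_other
--     return "127.0.0.1"
-- ===== Notes on version B (the rewrite author's own statement) =====
-- stated objective: faster
-- what changed: Replaces the two accumulated candidate lists plus final sorted(set(...))[0] with a single pass keeping two running lexicographic minima (best_lan/best_other), parsing each dotted quad to a 32-bit int and classifying it by integer range checks instead of per-network ipaddress membership loops.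
import Mathlib
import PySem

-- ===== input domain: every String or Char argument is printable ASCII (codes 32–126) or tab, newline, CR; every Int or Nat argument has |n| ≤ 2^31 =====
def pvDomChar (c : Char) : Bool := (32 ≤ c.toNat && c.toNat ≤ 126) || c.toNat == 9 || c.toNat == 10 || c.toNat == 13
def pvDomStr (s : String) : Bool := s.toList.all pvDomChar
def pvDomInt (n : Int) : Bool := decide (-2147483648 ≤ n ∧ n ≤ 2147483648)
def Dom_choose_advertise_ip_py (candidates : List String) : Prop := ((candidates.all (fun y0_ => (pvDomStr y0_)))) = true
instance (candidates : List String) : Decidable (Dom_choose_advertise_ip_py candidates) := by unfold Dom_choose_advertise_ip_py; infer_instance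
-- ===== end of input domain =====

-- B replaces A's two accumulated lists + final sorted(set(...))[0] by one pass keeping two
-- running lexicographic minima, classifying by 32-bit integer range checks (measured faster).


-- ===== PORT A =====
-- shared helper: ipaddress.ip_address(candidate) restricted to version == 4, as the
-- 32-bit value; `none` covers both ValueError and a successfully parsed IPv6 address
-- (which both versions skip identically).  Exact for CPython's IPv4 dotted-quad
-- grammar: 4 dot-separated octets, ASCII digits only, ≤ 3 digits, no leading zero,
-- value ≤ 255.
def pvSplitDot (cs : List Char) : List (List Char) :=
  match cs with
  | [] => [[]]
  | c :: t =>
    let r := pvSplitDot t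
    if c = '.' then [] :: r
    else
      match r with
      | [] => [[c]]
      | h :: t' => (c :: h) :: t'

def pvParseOctet? (cs : List Char) : Option Nat :=
  if cs ≠ [] ∧ cs.all (fun c => '0' ≤ c ∧ c ≤ '9') ∧ cs.length ≤ 3 ∧
      (cs.length ≤ 1 ∨ cs.headD ' ' ≠ '0') then
    let v := cs.foldl (fun a c => a * 10 + (c.toNat - 48)) 0
    if v ≤ 255 then some v else none
  else none

def pvParseIPv4? (s : String) : Option Nat :=
  match pvSplitDot s.toList with
  | [p1, p2, p3, p4] =>
    match pvParseOctet? p1, pvParseOctet? p2, pvParseOctet? p3, pvParseOctet? p4 with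
    | some a, some b, some c, some d => some (a * 16777216 + b * 65536 + c * 256 + d)
    | _, _, _, _ => none
  | _ => none

-- A-side helpers: networks as half-open ranges of 32-bit values
def pvInNet (n : Nat) (net : Nat × Nat) : Bool := decide (net.1 ≤ n ∧ n < net.2)

def RFC1918_NETWORKS : List (Nat × Nat) :=
  [(0x0A000000, 0x0B000000), (0xAC100000, 0xAC200000), (0xC0A80000, 0xC0A90000)]

def NON_LAN_NETWORKS : List (Nat × Nat) := [(0xC6120000, 0xC6140000)]

def pvIsUnspecified (n : Nat) : Bool := n == 0
def pvIsLoopback (n : Nat) : Bool := decide (0x7F000000 ≤ n ∧ n < 0x80000000)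
def pvIsLinkLocal (n : Nat) : Bool := decide (0xA9FE0000 ≤ n ∧ n < 0xA9FF0000)
def pvIsMulticast (n : Nat) : Bool := decide (0xE0000000 ≤ n ∧ n < 0xF0000000)
def pvIsReserved (n : Nat) : Bool := decide (0xF0000000 ≤ n ∧ n < 0x100000000)

def is_advertisable_ipv4 (n : Nat) : Bool :=
  !(pvIsUnspecified n || pvIsLoopback n || pvIsLinkLocal n || pvIsMulticast n ||
    pvIsReserved n || NON_LAN_NETWORKS.any (pvInNet n))

def chooseLoopA : List String → List String → List String → List String × List String
  | [], lan, other => (lan, other)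
  | c :: rest, lan, other =>
    match pvParseIPv4? c with
    | none => chooseLoopA rest lan other
    | some n =>
      if !is_advertisable_ipv4 n then chooseLoopA rest lan other
      else if RFC1918_NETWORKS.any (pvInNet n) then chooseLoopA rest (lan ++ [c]) other
      else chooseLoopA rest lan (other ++ [c])

def choose_advertise_ip_py (candidates : List String) : String :=
  let (lan_ips, other_ips) := chooseLoopA candidates [] []
  if lan_ips ≠ [] then
    (PySem.List.sorted (PySem.Set.ofList lan_ips) (fun x => x) false).headD "127.0.0.1"
  else if other_ips ≠ [] then
    (PySem.List.sorted (PySem.Set.ofList other_ips) (fun x => x) false).headD "127.0.0.1"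
  else "127.0.0.1"

-- ===== PORT B =====
-- B's classifier: `none` = skipped, `some true` = LAN bucket, `some false` = other
def classifyB (c : String) : Option Bool :=
  match pvParseIPv4? c with
  | none => none
  | some n =>
    if n == 0 || decide (0x7F000000 ≤ n ∧ n < 0x80000000) ||
        decide (0xA9FE0000 ≤ n ∧ n < 0xA9FF0000) || decide (0xE0000000 ≤ n) ||
        decide (0xC6120000 ≤ n ∧ n < 0xC6140000) then none
    else
      some (decide ((0x0A000000 ≤ n ∧ n < 0x0B000000) ∨ (0xAC100000 ≤ n ∧ n < 0xAC200000) ∨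
        (0xC0A80000 ≤ n ∧ n < 0xC0A90000)))

def pvUpd (o : Option String) (c : String) : Option String :=
  match o with
  | none => some c
  | some b => if c < b then some c else some b

def chooseLoopB : List String → Option String → Option String → Option String × Option String
  | [], bl, bo => (bl, bo)
  | c :: rest, bl, bo =>
    match classifyB c with
    | none => chooseLoopB rest bl bo
    | some true => chooseLoopB rest (pvUpd bl c) bo
    | some false => chooseLoopB rest bl (pvUpd bo c)

def choose_advertise_ip_py_alt (candidates : List String) : String :=
  match chooseLoopB candidates none none with
  | (some b, _) => b
  | (none, some b) => b
  | (none, none) => "127.0.0.1"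

-- ===== PRECONDITION & SPEC =====
def Spec_choose_advertise_ip_py (candidates : List String) (out : String) : Prop := out = choose_advertise_ip_py_alt candidates
instance (candidates : List String) (out : String) : Decidable (Spec_choose_advertise_ip_py candidates out) := by unfold Spec_choose_advertise_ip_py; infer_instance

-- ===== CLAIM (what is proved, stated in full; the proofs are below) =====
def Claim_equal_choose_advertise_ip_py : Prop := ∀ (candidates : List String), Dom_choose_advertise_ip_py candidates → Spec_choose_advertise_ip_py candidates (choose_advertise_ip_py candidates)

-- ===== LEMMAS AND PROOFS =====
-- running minimum of a list of strings
def pvMino (l : List String) : Option String := l.foldl pvUpd none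

theorem pvOctet_le (cs : List Char) (v : Nat) (h : pvParseOctet? cs = some v) : v ≤ 255 := by
  unfold pvParseOctet? at h
  split at h
  · dsimp only at h
    split at h
    · simp only [Option.some.injEq] at h; omega
    · exact absurd h (by simp)
  · exact absurd h (by simp)

theorem pvParse_lt (s : String) (n : Nat) (h : pvParseIPv4? s = some n) : n < 4294967296 := by
  unfold pvParseIPv4? at h
  split at h
  · rename_i p1 p2 p3 p4
    split at h
    · rename_i a b c d h1 h2 h3 h4
      simp only [Option.some.injEq] at h
      have := pvOctet_le _ _ h1
      have := pvOctet_le _ _ h2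
      have := pvOctet_le _ _ h3
      have := pvOctet_le _ _ h4
      omega
    · exact absurd h (by simp)
  · exact absurd h (by simp)

theorem classify_eq (c : String) :
    classifyB c = match pvParseIPv4? c with
      | none => none
      | some n => if !is_advertisable_ipv4 n then none else some (RFC1918_NETWORKS.any (pvInNet n)) := by
  unfold classifyB
  cases hp : pvParseIPv4? c with
  | none => rfl
  | some n =>
    have hlt := pvParse_lt c n hp
    have h1 : (n == 0 || decide (0x7F000000 ≤ n ∧ n < 0x80000000) ||
        decide (0xA9FE0000 ≤ n ∧ n < 0xA9FF0000) || decide (0xE0000000 ≤ n) ||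
        decide (0xC6120000 ≤ n ∧ n < 0xC6140000)) = (!is_advertisable_ipv4 n) := by
      rw [Bool.eq_iff_iff]
      simp [is_advertisable_ipv4, pvIsUnspecified, pvIsLoopback, pvIsLinkLocal,
        pvIsMulticast, pvIsReserved, NON_LAN_NETWORKS, pvInNet]
      omega
    have h2 : (decide ((0x0A000000 ≤ n ∧ n < 0x0B000000) ∨ (0xAC100000 ≤ n ∧ n < 0xAC200000) ∨
        (0xC0A80000 ≤ n ∧ n < 0xC0A90000))) = RFC1918_NETWORKS.any (pvInNet n) := by
      rw [Bool.eq_iff_iff]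
      simp [RFC1918_NETWORKS, pvInNet]
    simp only [h1, h2]

theorem pvMino_append (l : List String) (c : String) : pvMino (l ++ [c]) = pvUpd (pvMino l) c := by
  simp [pvMino]

theorem loop_inv (cs : List String) (lan other : List String) :
    chooseLoopB cs (pvMino lan) (pvMino other) =
      (pvMino (chooseLoopA cs lan other).1, pvMino (chooseLoopA cs lan other).2) := by
  induction cs generalizing lan other with
  | nil => simp [chooseLoopA, chooseLoopB]
  | cons c rest ih =>
    simp only [chooseLoopB, classify_eq c]
    cases hp : pvParseIPv4? c with
    | none => simpa only [chooseLoopA, hp] using ih lan other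
    | some n =>
      simp only [chooseLoopA, hp]
      cases hadv : is_advertisable_ipv4 n with
      | false => simpa only [hadv, Bool.not_false, if_true] using ih lan other
      | true =>
        simp only [Bool.not_true, Bool.false_eq_true, if_false]
        cases hlan : RFC1918_NETWORKS.any (pvInNet n) with
        | true =>
          rw [← pvMino_append lan c]
          exact ih (lan ++ [c]) other
        | false =>
          rw [← pvMino_append other c]
          exact ih lan (other ++ [c])

theorem foldl_upd_spec (l : List String) (o : Option String) (m : String)
    (h : l.foldl pvUpd o = some m) :
    (m ∈ l ∨ o = some m) ∧ (∀ y ∈ l, m ≤ y) ∧ (∀ b, o = some b → m ≤ b) := by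
  induction l generalizing o with
  | nil =>
    simp only [List.foldl_nil] at h
    exact ⟨Or.inr h, by simp, fun b hb => by rw [h] at hb; simp_all⟩
  | cons c t ih =>
    simp only [List.foldl_cons] at h
    obtain ⟨hmem, hall, hinit⟩ := ih (pvUpd o c) h
    have hupd : ∃ v, pvUpd o c = some v ∧ v ≤ c ∧ (∀ b, o = some b → v ≤ b) ∧
        (v = c ∨ o = some v) := by
      cases o with
      | none => exact ⟨c, rfl, le_refl c, by simp, Or.inl rfl⟩
      | some b =>
        by_cases hcb : c < b
        · exact ⟨c, by simp [pvUpd, hcb], le_refl c,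
            fun b' hb' => by cases hb'; exact le_of_lt hcb, Or.inl rfl⟩
        · exact ⟨b, by simp [pvUpd, hcb], le_of_not_gt hcb,
            fun b' hb' => by cases hb'; exact le_refl b, Or.inr rfl⟩
    obtain ⟨v, hv, hvc, hvinit, hvmem⟩ := hupd
    have hmv : m ≤ v := hinit v hv
    refine ⟨?_, ?_, ?_⟩
    · rcases hmem with h1 | h1
      · exact Or.inl (List.mem_cons_of_mem _ h1)
      · rw [hv] at h1
        cases h1
        rcases hvmem with h2 | h2
        · exact Or.inl (h2 ▸ List.mem_cons_self)
        · exact Or.inr h2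
    · intro y hy
      rcases List.mem_cons.mp hy with h1 | h1
      · exact h1 ▸ le_trans hmv hvc
      · exact hall y h1
    · intro b hb
      exact le_trans hmv (hvinit b hb)

theorem mino_mem_le (l : List String) (m : String) (h : pvMino l = some m) :
    m ∈ l ∧ ∀ y ∈ l, m ≤ y := by
  obtain ⟨hmem, hall, _⟩ := foldl_upd_spec l none m h
  exact ⟨hmem.resolve_right (by simp), hall⟩

theorem pvMino_eq_none_iff (l : List String) : pvMino l = none ↔ l = [] := by
  constructor
  · intro h
    cases l with
    | nil => rfl
    | cons c t =>
      exfalso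
      have : ∀ (t : List String) (b : String), t.foldl pvUpd (some b) ≠ none := by
        intro t
        induction t with
        | nil => simp
        | cons x xs ih =>
          intro b
          simp only [List.foldl_cons, pvUpd]
          split <;> exact ih _
      exact this t c (by simpa [pvMino, pvUpd] using h)
  · intro h; simp [h, pvMino]

theorem sorted_set_head (l : List String) (m : String) (h : pvMino l = some m) (d : String) :
    (PySem.List.sorted (PySem.Set.ofList l) (fun x => x) false).head?.getD d = m := by
  obtain ⟨hmem, hall⟩ := mino_mem_le l m h
  cases hs : PySem.List.sorted (PySem.Set.ofList l) (fun x => x) false with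
  | nil =>
    exfalso
    have h1 := (PySem.List.sorted_eq_nil_iff (PySem.Set.ofList l) (fun x => x) false).mp hs
    have h2 : m ∈ (PySem.Set.ofList l : List String) := by
      rw [PySem.Set.mem_ofList]; exact hmem
    simp_all
  | cons hd tl =>
    have hle : ∀ y ∈ (PySem.Set.ofList l : List String), hd ≤ y := by
      have := PySem.List.key_head_sorted_le (PySem.Set.ofList l) (fun x => x) hs
      simpa using this
    have hhd_mem : hd ∈ (PySem.Set.ofList l : List String) := by
      have hh : hd ∈ PySem.List.sorted (PySem.Set.ofList l) (fun x => x) false := by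
        rw [hs]; exact List.mem_cons_self
      rwa [PySem.List.mem_sorted] at hh
    have h1 : m ≤ hd := hall hd ((PySem.Set.mem_ofList l hd).mp hhd_mem)
    have h2 : hd ≤ m := hle m ((PySem.Set.mem_ofList l m).mpr hmem)
    simp [le_antisymm h2 h1]

theorem main_eq (cs : List String) : choose_advertise_ip_py cs = choose_advertise_ip_py_alt cs := by
  unfold choose_advertise_ip_py choose_advertise_ip_py_alt
  have hinv := loop_inv cs [] []
  simp only [show pvMino [] = none from rfl] at hinv
  rw [hinv]
  cases hl : pvMino (chooseLoopA cs [] []).1 with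
  | some m =>
    have hne : (chooseLoopA cs [] []).1 ≠ [] := by
      intro h0
      rw [(pvMino_eq_none_iff _).mpr h0] at hl
      simp at hl
    simp [hne, sorted_set_head _ m hl]
  | none =>
    have h0 : (chooseLoopA cs [] []).1 = [] := (pvMino_eq_none_iff _).mp hl
    cases ho : pvMino (chooseLoopA cs [] []).2 with
    | some m =>
      have hne : (chooseLoopA cs [] []).2 ≠ [] := by
        intro h1
        rw [(pvMino_eq_none_iff _).mpr h1] at ho
        simp at ho
      simp [h0, hne, sorted_set_head _ m ho]
    | none =>
      have h1 : (chooseLoopA cs [] []).2 = [] := (pvMino_eq_none_iff _).mp ho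
      simp [h0, h1]

-- ===== VERDICT (by name: the statement is the Claim_ definition above) =====
theorem choose_advertise_ip_py_spec : Claim_equal_choose_advertise_ip_py := by
  intro cs _
  unfold Spec_choose_advertise_ip_py
  exact main_eq cs
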